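-- pv_equiv track=rewrite | github.com/giabao182/Symbol-table | SymbolTable.py | assign_all_scopes
-- ===== SOURCE A (Python) =====
-- def valid_assign_with_oldVariable(type, name,scopes):
--     if not scopes:
--         return False
--     if name in scopes[-1]:
--         if type == scopes[-1][name]["type"]:
--             return True
--         else:
--             return False
--     else:
--         return valid_assign_with_oldVariable(type,name,scopes[:-1])
--
-- def assign_all_scopes(scopes, name, value) -> int:
--     if not scopes:
--         if value[0] == "'" and value[-1] == "'":
--             if not all(c.isalnum() or c == ' ' for c in value[1:-1]):
--                 return 4
--         elif value[0] != "'" or value[-1] != "'":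
--             if not value.isdigit():
--                 return 4
--         return 0
--     current_scope = scopes[-1]
--     if name in current_scope:
--         declared_type = current_scope[name]["type"]
--
--         if (valid_assign_with_oldVariable(declared_type,value,scopes)):
--             return 3
--
--         if declared_type == "number":
--             if not (len(value) > 0 and all(c in "0123456789" for c in value)):
--                 return 1
--         elif declared_type == "string":
--             if len(value) < 2 or value[0] != "'" or value[-1] != "'":
--                 return 1
--             inside = value[1:-1]
--             if not all(c.isalnum() or c == ' ' for c in inside):
--                 return 1
--         current_scope[name]["value"] = value
--         return 3
--     return assign_all_scopes(scopes[:-1], name, value)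
-- ===== SOURCE B (Python) =====
-- def _find_scope_index(scopes, name):
--     i = len(scopes) - 1
--     while i >= 0 and name not in scopes[i]:
--         i -= 1
--     return i
--
-- def _find_value_entry(scopes, value, i):
--     j = i
--     while j >= 0:
--         if value in scopes[j]:
--             return scopes[j][value]
--         j -= 1
--     return None
--
-- def assign_all_scopes(scopes, name, value):
--     i = _find_scope_index(scopes, name)
--     if i < 0:
--         if value[0] == "'" and value[-1] == "'":
--             return 0 if all(c.isalnum() or c == ' ' for c in value[1:-1]) else 4
--         return 0 if value.isdigit() else 4
--     entry = scopes[i][name]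
--     declared_type = entry["type"]
--     hit = _find_value_entry(scopes, value, i)
--     if hit is not None and declared_type == hit["type"]:
--         return 3
--     if declared_type == "number":
--         if not (len(value) > 0 and all(c in "0123456789" for c in value)):
--             return 1
--     elif declared_type == "string":
--         if len(value) < 2 or value[0] != "'" or value[-1] != "'":
--             return 1
--         if not all(c.isalnum() or c == ' ' for c in value[1:-1]):
--             return 1
--     entry["value"] = value
--     return 3
-- ===== Notes on version B (the rewrite author's own statement) =====
-- stated objective: simpler
-- what changed: Both recursive functions (the scope walk that repeatedly copies scopes[:-1] and the old-variable type check) are replaced by two iterative index scans from the end of the scopes list, so no list slices are allocated and the validation body runs once on the found scope.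
import Mathlib
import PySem

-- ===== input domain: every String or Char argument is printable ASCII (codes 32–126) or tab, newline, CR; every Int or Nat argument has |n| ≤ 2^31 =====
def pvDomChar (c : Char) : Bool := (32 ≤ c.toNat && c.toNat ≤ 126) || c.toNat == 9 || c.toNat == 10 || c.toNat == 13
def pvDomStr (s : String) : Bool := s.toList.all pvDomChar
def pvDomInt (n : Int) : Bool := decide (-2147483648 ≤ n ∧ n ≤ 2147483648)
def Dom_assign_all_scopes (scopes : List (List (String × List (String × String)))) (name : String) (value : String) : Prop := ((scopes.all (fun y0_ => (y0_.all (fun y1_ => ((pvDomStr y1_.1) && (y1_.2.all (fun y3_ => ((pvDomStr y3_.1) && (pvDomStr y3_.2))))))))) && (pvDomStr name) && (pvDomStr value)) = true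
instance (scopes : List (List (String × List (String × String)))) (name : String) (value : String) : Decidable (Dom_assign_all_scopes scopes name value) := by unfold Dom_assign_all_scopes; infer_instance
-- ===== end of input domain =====

-- B replaces A's two slice-copying recursions by two iterative index scans from the end of the
-- scopes list (objective: simpler, no scopes[:-1] copies). Both Pythons mutate the found entry's
-- "value" field identically; the equivalence proved here is about the RETURN value only.

-- ===== PORT A =====
-- dict lookup (first match; Python dicts have unique keys); d[k]["type"] is guarded with getD ""
-- only where Python would raise KeyError / IndexError — those inputs are excluded by Pre_.
def valid_assign_with_oldVariable (type_ : String) (name : String) (scopes : List (List (String × List (String × String)))) : Bool :=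
  if h : scopes = [] then false
  else
    match List.lookup name ((PySem.List.pyGet? scopes (-1)).getD []) with   -- scopes[-1], name in / [name]
    | some info => type_ == ((List.lookup "type" info).getD "")
    | none => valid_assign_with_oldVariable type_ name (PySem.List.slice scopes none (some (-1)))  -- scopes[:-1]
termination_by scopes.length
decreasing_by
  have hl : 0 < scopes.length := List.length_pos_of_ne_nil h
  simp [PySem.List.slice_to_neg_one]; omega

def assign_all_scopes (scopes : List (List (String × List (String × String)))) (name : String) (value : String) : Int :=
  if h : scopes = [] then
    if ((PySem.Str.pyGet? value 0).getD ' ' == '\'') && ((PySem.Str.pyGet? value (-1)).getD ' ' == '\'') then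
      if !((PySem.List.slice value.toList (some 1) (some (-1))).all (fun c => PySem.Chars.isalnum c || c == ' ')) then 4 else 0
    else if !((PySem.Str.pyGet? value 0).getD ' ' == '\'') || !((PySem.Str.pyGet? value (-1)).getD ' ' == '\'') then
      if !(PySem.Str.strIsdigit value) then 4 else 0
    else 0
  else
    match List.lookup name ((PySem.List.pyGet? scopes (-1)).getD []) with   -- current_scope = scopes[-1]
    | some info =>
      let declared_type := (List.lookup "type" info).getD ""
      if valid_assign_with_oldVariable declared_type value scopes then 3
      else if declared_type == "number" then
        if !(decide (0 < value.toList.length) && value.toList.all (fun c => ("0123456789".toList).contains c)) then 1 else 3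
      else if declared_type == "string" then
        if decide (value.toList.length < 2) || !((PySem.Str.pyGet? value 0).getD ' ' == '\'') || !((PySem.Str.pyGet? value (-1)).getD ' ' == '\'') then 1
        else if !((PySem.List.slice value.toList (some 1) (some (-1))).all (fun c => PySem.Chars.isalnum c || c == ' ')) then 1
        else 3
      else 3
    | none => assign_all_scopes (PySem.List.slice scopes none (some (-1))) name value   -- scopes[:-1]
termination_by scopes.length
decreasing_by
  have hl : 0 < scopes.length := List.length_pos_of_ne_nil h
  simp [PySem.List.slice_to_neg_one]; omega

-- ===== PORT B =====
-- while i >= 0 and name not in scopes[i]: i -= 1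
def pvFindScopeIdx (scopes : List (List (String × List (String × String)))) (name : String) (i : Int) : Int :=
  if h : 0 ≤ i ∧ List.lookup name ((PySem.List.pyGet? scopes i).getD []) = none then
    pvFindScopeIdx scopes name (i - 1)
  else i
termination_by (i + 1).toNat
decreasing_by omega

-- while j >= 0: if value in scopes[j]: return scopes[j][value]; j -= 1
def pvFindValueEntry (scopes : List (List (String × List (String × String)))) (value : String) (j : Int) : Option (List (String × String)) :=
  if h : 0 ≤ j then
    match List.lookup value ((PySem.List.pyGet? scopes j).getD []) with
    | some e => some e
    | none => pvFindValueEntry scopes value (j - 1)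
  else none
termination_by (j + 1).toNat
decreasing_by omega

def assign_all_scopes_alt (scopes : List (List (String × List (String × String)))) (name : String) (value : String) : Int :=
  let i := pvFindScopeIdx scopes name ((scopes.length : Int) - 1)
  if i < 0 then
    if ((PySem.Str.pyGet? value 0).getD ' ' == '\'') && ((PySem.Str.pyGet? value (-1)).getD ' ' == '\'') then
      if (PySem.List.slice value.toList (some 1) (some (-1))).all (fun c => PySem.Chars.isalnum c || c == ' ') then 0 else 4
    else if PySem.Str.strIsdigit value then 0 else 4
  else
    let entry := (List.lookup name ((PySem.List.pyGet? scopes i).getD [])).getD []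
    let declared_type := (List.lookup "type" entry).getD ""
    let hit := pvFindValueEntry scopes value i
    if (match hit with | some e => declared_type == ((List.lookup "type" e).getD "") | none => false) then 3
    else if declared_type == "number" then
      if !(decide (0 < value.toList.length) && value.toList.all (fun c => ("0123456789".toList).contains c)) then 1 else 3
    else if declared_type == "string" then
      if decide (value.toList.length < 2) || !((PySem.Str.pyGet? value 0).getD ' ' == '\'') || !((PySem.Str.pyGet? value (-1)).getD ' ' == '\'') then 1
      else if !((PySem.List.slice value.toList (some 1) (some (-1))).all (fun c => PySem.Chars.isalnum c || c == ' ')) then 1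
      else 3
    else 3

-- ===== PRECONDITION & SPEC =====
-- Pre_ excludes exactly the inputs on which A raises: an empty value with name bound in no scope
-- (IndexError on value[0]), and a consulted entry without a "type" field (KeyError) — the innermost
-- binding of name, or the old-variable binding of value the helper reads in the scopes up to it.
def Pre_assign_all_scopes (scopes : List (List (String × List (String × String)))) (name : String) (value : String) : Prop :=
  ((scopes.all (fun sc => (List.lookup name sc).isNone)) = true → value ≠ "") ∧
  ((scopes.reverse.find? (fun sc => (List.lookup name sc).isSome)).all
      (fun sc => (List.lookup "type" ((List.lookup name sc).getD [])).isSome) = true) ∧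
  (((scopes.reverse.dropWhile (fun sc => (List.lookup name sc).isNone)).find?
      (fun sc => (List.lookup value sc).isSome)).all
      (fun sc => (List.lookup "type" ((List.lookup value sc).getD [])).isSome) = true)
instance (scopes : List (List (String × List (String × String)))) (name : String) (value : String) : Decidable (Pre_assign_all_scopes scopes name value) := by unfold Pre_assign_all_scopes; infer_instance

def pvWitness_assign_all_scopes : (List (List (String × List (String × String)))) × String × String :=
  ([[("x", [("type", "number"), ("value", "0")])]], "x", "7")

def Spec_assign_all_scopes (scopes : List (List (String × List (String × String)))) (name : String) (value : String) (out : Int) : Prop := out = assign_all_scopes_alt scopes name value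
instance (scopes : List (List (String × List (String × String)))) (name : String) (value : String) (out : Int) : Decidable (Spec_assign_all_scopes scopes name value out) := by unfold Spec_assign_all_scopes; infer_instance

-- ===== CLAIM (what is proved, stated in full; the proofs are below) =====
def Claim_equal_assign_all_scopes : Prop := ∀ (scopes : List (List (String × List (String × String)))) (name : String) (value : String), Dom_assign_all_scopes scopes name value → Pre_assign_all_scopes scopes name value → Spec_assign_all_scopes scopes name value (assign_all_scopes scopes name value)

-- ===== LEMMAS AND PROOFS =====

-- the two value-literal validators (A's fall-through if/elif, B's two conditional returns) agree
theorem pv_base_eq (b1 b2 b3 b4 : Bool) :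
    (if b1 && b2 then (if !b3 then (4 : Int) else 0)
     else if !b1 || !b2 then (if !b4 then 4 else 0) else 0)
    = (if b1 && b2 then (if b3 then (0 : Int) else 4)
       else if b4 then 0 else 4) := by
  cases b1 <;> cases b2 <;> cases b3 <;> cases b4 <;> rfl

theorem pv_get_stable {α : Type} (xs : List α) (x : α) (j : Int)
    (h0 : 0 ≤ j) (hj : j < (xs.length : Int)) :
    PySem.List.pyGet? (xs ++ [x]) j = PySem.List.pyGet? xs j := by
  rw [PySem.List.pyGet?_of_nonneg _ h0, PySem.List.pyGet?_of_nonneg _ h0]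
  exact List.getElem?_append_left (by omega)

theorem pvFindValueEntry_stable (xs : List (List (String × List (String × String))))
    (x : List (String × List (String × String))) (value : String) :
    ∀ (j : Int), j ≤ (xs.length : Int) - 1 →
      pvFindValueEntry (xs ++ [x]) value j = pvFindValueEntry xs value j := by
  have H : ∀ (n : Nat) (j : Int), (j + 1).toNat ≤ n → j ≤ (xs.length : Int) - 1 →
      pvFindValueEntry (xs ++ [x]) value j = pvFindValueEntry xs value j := by
    intro n
    induction n with
    | zero =>
      intro j h1 _
      have hj : ¬ (0 ≤ j) := by omega
      conv_lhs => rw [pvFindValueEntry.eq_def]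
      conv_rhs => rw [pvFindValueEntry.eq_def]
      rw [dif_neg hj, dif_neg hj]
    | succ n ih =>
      intro j h1 h2
      by_cases hj : 0 ≤ j
      · have hg := pv_get_stable xs x j hj (by omega)
        conv_lhs => rw [pvFindValueEntry.eq_def]
        conv_rhs => rw [pvFindValueEntry.eq_def]
        rw [dif_pos hj, dif_pos hj, hg]
        cases hlk : List.lookup value ((PySem.List.pyGet? xs j).getD []) with
        | some e => rfl
        | none => exact ih (j - 1) (by omega) (by omega)
      · conv_lhs => rw [pvFindValueEntry.eq_def]
        conv_rhs => rw [pvFindValueEntry.eq_def]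
        rw [dif_neg hj, dif_neg hj]
  intro j hj
  exact H (j + 1).toNat j le_rfl hj

theorem pvFindScopeIdx_le (scopes : List (List (String × List (String × String)))) (name : String) :
    ∀ (j : Int), pvFindScopeIdx scopes name j ≤ j := by
  have H : ∀ (n : Nat) (j : Int), (j + 1).toNat ≤ n → pvFindScopeIdx scopes name j ≤ j := by
    intro n
    induction n with
    | zero =>
      intro j h1
      rw [pvFindScopeIdx.eq_def, dif_neg (fun hc => by omega)]
    | succ n ih =>
      intro j h1
      by_cases hc : 0 ≤ j ∧ List.lookup name ((PySem.List.pyGet? scopes j).getD []) = none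
      · rw [pvFindScopeIdx.eq_def, dif_pos hc]
        have := ih (j - 1) (by omega)
        omega
      · rw [pvFindScopeIdx.eq_def, dif_neg hc]
  intro j
  exact H (j + 1).toNat j le_rfl

theorem pvFindScopeIdx_stable (xs : List (List (String × List (String × String))))
    (x : List (String × List (String × String))) (name : String) :
    ∀ (j : Int), j ≤ (xs.length : Int) - 1 →
      pvFindScopeIdx (xs ++ [x]) name j = pvFindScopeIdx xs name j := by
  have H : ∀ (n : Nat) (j : Int), (j + 1).toNat ≤ n → j ≤ (xs.length : Int) - 1 →
      pvFindScopeIdx (xs ++ [x]) name j = pvFindScopeIdx xs name j := by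
    intro n
    induction n with
    | zero =>
      intro j h1 _
      conv_lhs => rw [pvFindScopeIdx.eq_def]
      conv_rhs => rw [pvFindScopeIdx.eq_def]
      rw [dif_neg (fun hc => by omega : ¬ (0 ≤ j ∧ _)), dif_neg (fun hc => by omega : ¬ (0 ≤ j ∧ _))]
    | succ n ih =>
      intro j h1 h2
      by_cases hj : 0 ≤ j
      · have hg := pv_get_stable xs x j hj (by omega)
        conv_lhs => rw [pvFindScopeIdx.eq_def]
        conv_rhs => rw [pvFindScopeIdx.eq_def]
        rw [hg]
        by_cases hc : 0 ≤ j ∧ List.lookup name ((PySem.List.pyGet? xs j).getD []) = none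
        · rw [dif_pos hc, dif_pos hc]
          exact ih (j - 1) (by omega) (by omega)
        · rw [dif_neg hc, dif_neg hc]
      · conv_lhs => rw [pvFindScopeIdx.eq_def]
        conv_rhs => rw [pvFindScopeIdx.eq_def]
        rw [dif_neg (fun hc => hj hc.1), dif_neg (fun hc => hj hc.1)]
  intro j hj
  exact H (j + 1).toNat j le_rfl hj

theorem pv_valid_eq (t v : String) :
    ∀ (scopes : List (List (String × List (String × String)))),
      valid_assign_with_oldVariable t v scopes
      = (match pvFindValueEntry scopes v ((scopes.length : Int) - 1) with
         | some e => t == ((List.lookup "type" e).getD "")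
         | none => false) := by
  intro scopes
  induction scopes using List.reverseRecOn with
  | nil =>
    rw [valid_assign_with_oldVariable.eq_def, dif_pos rfl]
    rw [pvFindValueEntry.eq_def]
    norm_num
  | append_singleton xs x ih =>
    have hne : xs ++ [x] ≠ [] := by simp
    have hlen : ((xs ++ [x]).length : Int) - 1 = (xs.length : Int) := by
      push_cast [List.length_append, List.length_singleton]; ring
    rw [valid_assign_with_oldVariable.eq_def, dif_neg hne,
        PySem.List.pyGet?_neg_one_append_singleton, hlen,
        pvFindValueEntry.eq_def, dif_pos (Int.natCast_nonneg _),
        PySem.List.pyGet?_natCast, List.getElem?_concat_length]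
    simp only [Option.getD_some]
    cases hlk : List.lookup v x with
    | some e => rfl
    | none =>
      rw [PySem.List.slice_to_neg_one, List.dropLast_concat,
          pvFindValueEntry_stable xs x v ((xs.length : Int) - 1) (le_refl _)]
      exact ih

theorem pv_alt_stable (xs : List (List (String × List (String × String))))
    (x : List (String × List (String × String))) (name value : String)
    (hx : List.lookup name x = none) :
    assign_all_scopes_alt (xs ++ [x]) name value = assign_all_scopes_alt xs name value := by
  have hlen : ((xs ++ [x]).length : Int) - 1 = (xs.length : Int) := by
    push_cast [List.length_append, List.length_singleton]; ring
  have hstep : pvFindScopeIdx (xs ++ [x]) name ((xs.length : Int)) =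
      pvFindScopeIdx xs name ((xs.length : Int) - 1) := by
    rw [pvFindScopeIdx.eq_def, dif_pos ⟨Int.natCast_nonneg _, by
      rw [PySem.List.pyGet?_natCast, List.getElem?_concat_length]; simpa using hx⟩]
    exact pvFindScopeIdx_stable xs x name ((xs.length : Int) - 1) (le_refl _)
  simp only [assign_all_scopes_alt, hlen, hstep]
  set i := pvFindScopeIdx xs name ((xs.length : Int) - 1) with hi
  have hile : i ≤ (xs.length : Int) - 1 := pvFindScopeIdx_le xs name _
  by_cases hi0 : i < 0
  · rw [if_pos hi0, if_pos hi0]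
  · rw [if_neg hi0, if_neg hi0, pv_get_stable xs x i (by omega) (by omega),
        pvFindValueEntry_stable xs x value i (by omega)]

theorem pv_main (name value : String) :
    ∀ (scopes : List (List (String × List (String × String)))),
      assign_all_scopes scopes name value = assign_all_scopes_alt scopes name value := by
  intro scopes
  induction scopes using List.reverseRecOn with
  | nil =>
    rw [assign_all_scopes.eq_def, dif_pos rfl]
    simp only [assign_all_scopes_alt, List.length_nil, Nat.cast_zero, zero_sub]
    rw [pvFindScopeIdx.eq_def, dif_neg (fun hc => by omega : ¬ ((0 : Int) ≤ -1 ∧ _)),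
        if_pos (by norm_num : (-1 : Int) < 0)]
    exact pv_base_eq _ _ _ _
  | append_singleton xs x ih =>
    have hne : xs ++ [x] ≠ [] := by simp
    have hlen : ((xs ++ [x]).length : Int) - 1 = (xs.length : Int) := by
      push_cast [List.length_append, List.length_singleton]; ring
    rw [assign_all_scopes.eq_def, dif_neg hne, PySem.List.pyGet?_neg_one_append_singleton]
    simp only [Option.getD_some]
    cases hlk : List.lookup name x with
    | none =>
      rw [PySem.List.slice_to_neg_one, List.dropLast_concat, pv_alt_stable xs x name value hlk]
      exact ih
    | some info =>
      have hidx : pvFindScopeIdx (xs ++ [x]) name ((xs.length : Int)) = ((xs.length : Int)) := by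
        rw [pvFindScopeIdx.eq_def, dif_neg]
        intro hc
        rw [PySem.List.pyGet?_natCast, List.getElem?_concat_length] at hc
        simp [hlk] at hc
      have hvalid := pv_valid_eq ((List.lookup "type" info).getD "") value (xs ++ [x])
      rw [hlen] at hvalid
      simp only [assign_all_scopes_alt, hlen, hidx]
      rw [if_neg (by omega : ¬ ((xs.length : Int)) < 0), hvalid,
          PySem.List.pyGet?_natCast, List.getElem?_concat_length]
      simp only [Option.getD_some, hlk]

-- ===== VERDICT (by name: the statement is the Claim_ definition above) =====
theorem assign_all_scopes_spec : Claim_equal_assign_all_scopes := by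
  intro scopes name value _ _
  unfold Spec_assign_all_scopes
  exact pv_main name value scopes
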